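-- pv_equiv track=rewrite | github.com/haddocking/ai-antibodies | src/aiabs/modules/cluster.py | get_clustering_dict
-- ===== SOURCE A (Python) =====
-- def get_clustering_dict(clusters, ligands):
--     """
--     Gets dictionary of clusters.
--
--     Parameters
--     ----------
--     clusters : list
--         list of cluster IDs
--     ligands : list
--         names of the ligands
--
--     Returns
--     -------
--     cl_dict : dict
--         dictionary of clustered interfaces
--         *example* {
--             1 : [
--             'interface_1', 'interface_3'
--                 ] ,
--             2 : [
--             'interface_2'
--             ],
--             ...
--             }
--     """
--     cl_dict = {}
--     # loop over clusters
--     for cl in range(len(clusters)):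
--         if clusters[cl] not in cl_dict.keys():
--             cl_dict[clusters[cl]] = [ligands[cl]]
--         else:
--             cl_dict[clusters[cl]].append(ligands[cl])
--     #log.info(f"Cluster dictionary {cl_dict}")
--     return cl_dict
-- ===== SOURCE B (Python) =====
-- def get_clustering_dict(clusters, ligands):
--     keys = list(dict.fromkeys(clusters))
--     return {k: [lig for c, lig in zip(clusters, ligands) if c == k] for k in keys}
-- ===== Notes on version B (the rewrite author's own statement) =====
-- stated objective: idiomatic
-- what changed: Replaces A's incremental index-loop dict building (insert-or-append per element) with a key-extraction pass (dict.fromkeys) followed by a dict comprehension that filters the zipped pairs per key.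
import Mathlib
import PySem

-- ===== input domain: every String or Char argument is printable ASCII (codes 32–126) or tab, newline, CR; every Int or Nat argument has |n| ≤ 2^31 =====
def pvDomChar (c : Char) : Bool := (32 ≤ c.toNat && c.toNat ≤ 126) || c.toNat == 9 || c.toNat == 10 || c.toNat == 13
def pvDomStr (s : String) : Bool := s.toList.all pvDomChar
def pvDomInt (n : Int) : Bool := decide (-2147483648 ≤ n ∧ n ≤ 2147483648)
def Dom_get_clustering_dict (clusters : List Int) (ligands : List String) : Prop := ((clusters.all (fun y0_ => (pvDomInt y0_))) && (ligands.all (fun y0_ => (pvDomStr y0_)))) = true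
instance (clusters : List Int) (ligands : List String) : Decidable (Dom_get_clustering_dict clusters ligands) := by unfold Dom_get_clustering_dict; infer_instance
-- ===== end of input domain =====

-- B changes the decomposition: keys first (dict.fromkeys), then one filtering scan per key; no mutation on either side.

-- ===== PORT A =====
-- A: for cl in range(len(clusters)): insert-or-append; pyGet? models the two indexings (none = IndexError).
def get_clustering_dict (clusters : List Int) (ligands : List String) : List (Int × List String) :=
  match (PySem.List.pyRange 0 (clusters.length : Int) 1).foldl
      (fun od cl =>
        od.bind fun d =>
          (PySem.List.pyGet? clusters cl).bind fun c =>
            (PySem.List.pyGet? ligands cl).map fun lig =>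
              if d.contains c then d.modify c [] (fun v => v ++ [lig]) else d.insert c [lig])
      (some PySem.Dict.empty) with
  | some d => d.items
  | none => []   -- unreachable inside Pre_ (Python raises IndexError there)

-- ===== PORT B =====
-- B: keys = list(dict.fromkeys(clusters)); {k: [lig for c, lig in zip(clusters, ligands) if c == k] for k in keys}
def get_clustering_dict_alt (clusters : List Int) (ligands : List String) : List (Int × List String) :=
  (PySem.List.dedup clusters).map
    (fun k => (k, ((clusters.zip ligands).filter (fun p => p.1 == k)).map (·.2)))

-- ===== PRECONDITION & SPEC =====
-- Pre_ excludes exactly the inputs where A raises IndexError (more clusters than ligands).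
def Pre_get_clustering_dict (clusters : List Int) (ligands : List String) : Prop :=
  clusters.length ≤ ligands.length
instance (clusters : List Int) (ligands : List String) : Decidable (Pre_get_clustering_dict clusters ligands) := by unfold Pre_get_clustering_dict; infer_instance
def pvWitness_get_clustering_dict : List Int × List String := ([1, 2, 1], ["a", "b", "c"])

def Spec_get_clustering_dict (clusters : List Int) (ligands : List String) (out : List (Int × List String)) : Prop := out = get_clustering_dict_alt clusters ligands
instance (clusters : List Int) (ligands : List String) (out : List (Int × List String)) : Decidable (Spec_get_clustering_dict clusters ligands out) := by unfold Spec_get_clustering_dict; infer_instance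

-- ===== CLAIM (what is proved, stated in full; the proofs are below) =====
def Claim_equal_get_clustering_dict : Prop := ∀ (clusters : List Int) (ligands : List String), Dom_get_clustering_dict clusters ligands → Pre_get_clustering_dict clusters ligands → Spec_get_clustering_dict clusters ligands (get_clustering_dict clusters ligands)

-- ===== LEMMAS AND PROOFS =====

-- A's insert-or-append branch is exactly Dict.modify with default [].
lemma step_eq_modify (d : PySem.Dict Int (List String)) (c : Int) (lig : String) :
    (if d.contains c then d.modify c [] (fun v => v ++ [lig]) else d.insert c [lig]) =
      d.modify c [] (fun v => v ++ [lig]) := by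
  by_cases h : d.contains c = true
  · simp [h]
  · simp only [Bool.not_eq_true] at h
    simp [h, PySem.Dict.modify, PySem.Dict.getD_of_not_contains d ([] : List String) h]

-- threading an Option through a fold of total steps is the fold under 'some'
lemma foldl_option_map {α β : Type} (f : β → α → β) (l : List α) (b : β) :
    l.foldl (fun od p => Option.map (fun d => f d p) od) (some b) = some (l.foldl f b) := by
  induction l generalizing b with
  | nil => rfl
  | cons x xs ih => simpa using ih (f b x)

-- Option-threaded fold over in-range indices collapses to the plain zip fold.
lemma fold_some (clusters : List Int) (ligands : List String)
    (h : clusters.length ≤ ligands.length) :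
    (PySem.List.pyRange 0 (clusters.length : Int) 1).foldl
      (fun od cl =>
        od.bind fun d =>
          (PySem.List.pyGet? clusters cl).bind fun c =>
            (PySem.List.pyGet? ligands cl).map fun lig =>
              if d.contains c then d.modify c [] (fun v => v ++ [lig]) else d.insert c [lig])
      (some PySem.Dict.empty) =
    some ((clusters.zip ligands).foldl
      (fun d p => d.modify p.1 [] (fun v => v ++ [p.2])) PySem.Dict.empty) := by
  have hlen : (clusters.zip ligands).length = clusters.length := by
    simp [List.length_zip]; omega
  have hc : ∀ (od : Option (PySem.Dict Int (List String))),
      ∀ j ∈ PySem.List.pyRange 0 (clusters.length : Int) 1,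
      (od.bind fun d =>
          (PySem.List.pyGet? clusters j).bind fun c =>
            (PySem.List.pyGet? ligands j).map fun lig =>
              if d.contains c then d.modify c [] (fun v => v ++ [lig]) else d.insert c [lig]) =
      Option.map (fun d =>
          d.modify (PySem.List.pyGetD (clusters.zip ligands) j ((0:Int),"")).1 []
            (fun v => v ++ [(PySem.List.pyGetD (clusters.zip ligands) j ((0:Int),"")).2])) od := by
    intro od j hj
    rw [PySem.List.mem_pyRange_one] at hj
    have hj1 : 0 ≤ j := hj.1
    have hj2 : j.toNat < clusters.length := by omega
    have hj3 : j.toNat < ligands.length := by omega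
    have hz : PySem.List.pyGetD (clusters.zip ligands) j ((0:Int),"") =
        (clusters[j.toNat], ligands[j.toNat]) := by
      rw [PySem.List.pyGetD_eq_getElem _ _ hj1 (by rw [hlen]; exact_mod_cast hj.2)]
      simp
    rw [PySem.List.pyGet?_eq_some_getElem _ hj1 (by exact_mod_cast hj.2),
        PySem.List.pyGet?_eq_some_getElem _ hj1 (by omega), hz]
    cases od with
    | none => rfl
    | some d => simp [step_eq_modify]
  rw [PySem.List.foldl_congr_mem _ _ _ _ hc]
  rw [show (clusters.length : Int) = ((clusters.zip ligands).length : Int) by rw [hlen]]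
  exact (PySem.List.foldl_pyRange_zero_pyGetD' (clusters.zip ligands) ((0:Int),"")
      (fun od p => Option.map (fun d => d.modify p.1 [] (fun v => v ++ [p.2])) od)
      (some PySem.Dict.empty)).trans (foldl_option_map _ _ _)

-- ===== VERDICT (by name: the statement is the Claim_ definition above) =====
theorem get_clustering_dict_spec : Claim_equal_get_clustering_dict := by
  intro clusters ligands _ hpre
  unfold Spec_get_clustering_dict get_clustering_dict get_clustering_dict_alt
  rw [fold_some clusters ligands hpre]
  dsimp only
  have hnd : ((clusters.zip ligands).foldl
      (fun d p => d.modify p.1 [] (fun v => v ++ [p.2])) PySem.Dict.empty).keys.Nodup :=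
    PySem.Dict.nodup_keys_foldl_modify_key _ Prod.fst [] (fun _ p => fun v => v ++ [p.2]) _ (by simp)
  rw [PySem.Dict.items_eq_map_keys _ hnd []]
  rw [PySem.Dict.keys_foldl_modify_key _ Prod.fst [] (fun _ p => fun v => v ++ [p.2])]
  have hkeys : PySem.Set.update (PySem.Dict.empty : PySem.Dict Int (List String)).keys ((clusters.zip ligands).map Prod.fst) =
      PySem.List.dedup clusters := by
    rw [List.map_fst_zip hpre]
    simp [PySem.List.dedup_eq_ofList, PySem.Set.update, PySem.Set.ofList]
  rw [hkeys]
  refine List.map_congr_left ?_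
  intro k _
  rw [PySem.Dict.getD_foldl_modify_append]
  simp
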